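-- pv_equiv track=rewrite | github.com/yuhua0731/Explore_leet | solution.py | waysToSplit
-- ===== SOURCE A (Python) =====
-- from typing import List
--
-- def waysToSplit(nums: List[int]) -> int:
--     """
--     split nums into three non-empty contiguous subarrays - named left, mid, right
--     sum(left) < sum(mid) < sum(right)
--     nums:     [--left--] [---------mid----------] [-------right-------]
--     subarrays:      left left + 1   (low <- right right + 1 -> high)
--
--     time complexity = O(NlogN)
--     space complexity = O(1) extra space
--
--     Args:
--         nums (List[int]): input array
--
--     Returns:
--         int: number of split ways
--     """
--     MOD = 10 ** 9 + 7
--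
--     for i in range(1, len(nums)):
--         nums[i] += nums[i - 1]
--
--     # find the lower boundary for left = idx
--     # binary search: return the smallest index to ensure that sum(mid) >= sum(left)
--     def find_low(idx):
--         start, end = idx + 1, len(nums) - 1
--         while start < end:
--             mid = (start + end) >> 1
--             if nums[mid] - 2 * nums[idx] >= 0:
--                 end = mid
--             else:
--                 start = mid + 1
--         return start
--
--     # find the higher boundary for left = idx
--     # binary searh: return the biggest index to ensure that sum(right) >= sum(mid)
--     def find_high(idx):
--         start, end = idx + 1, len(nums) - 1
--         while start < end:
--             mid = (start + end) >> 1
--             if nums[-1] - nums[mid] >= nums[mid] - nums[idx]: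
--                 start = mid + 1
--             else:
--                 end = mid
--         return start
--
--     # [:left + 1] [left + 1:right + 1] [right + 1:]
--     ans = 0
--     for left in range(len(nums)):
--         if nums[-1] - nums[left] < 2 * nums[left]: break
--         ans = (ans + max(0, find_high(left) - find_low(left))) % MOD
--     return ans
-- ===== SOURCE B (Python) =====
-- from typing import List
--
-- def waysToSplit(nums: List[int]) -> int:
--     # Non-mutating re-implementation: prefix sums via a scan, one generic
--     # recursive binary search used with two predicates, explicit cut index
--     # instead of a break, single mod at the end.
--     MOD = 10 ** 9 + 7
--     p = []
--     s = 0
--     for v in nums: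
--         s += v
--         p.append(s)
--     n = len(nums)
--     total = p[-1] if p else 0
--
--     def bisect(pred, lo, hi):
--         if lo >= hi:
--             return lo
--         mid = (lo + hi) >> 1
--         return bisect(pred, lo, mid) if pred(mid) else bisect(pred, mid + 1, hi)
--
--     cut = next((l for l in range(n) if total - p[l] < 2 * p[l]), n)
--     ans = sum(
--         max(0, bisect(lambda m: 2 * p[m] > total + p[l], l + 1, n - 1)
--                - bisect(lambda m: p[m] >= 2 * p[l], l + 1, n - 1))
--         for l in range(cut))
--     return ans % MOD
-- ===== Notes on version B (the rewrite author's own statement) =====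
-- stated objective: alternative
-- what changed: B computes prefix sums with a non-mutating scan instead of overwriting the input in place, replaces the two hand-written imperative binary-search while-loops by one generic recursive bisect(pred, lo, hi) helper applied to two predicates, replaces the break by an explicitly computed cut index, and takes the modulus once of the sum of contributions instead of after every step.
import Mathlib
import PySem

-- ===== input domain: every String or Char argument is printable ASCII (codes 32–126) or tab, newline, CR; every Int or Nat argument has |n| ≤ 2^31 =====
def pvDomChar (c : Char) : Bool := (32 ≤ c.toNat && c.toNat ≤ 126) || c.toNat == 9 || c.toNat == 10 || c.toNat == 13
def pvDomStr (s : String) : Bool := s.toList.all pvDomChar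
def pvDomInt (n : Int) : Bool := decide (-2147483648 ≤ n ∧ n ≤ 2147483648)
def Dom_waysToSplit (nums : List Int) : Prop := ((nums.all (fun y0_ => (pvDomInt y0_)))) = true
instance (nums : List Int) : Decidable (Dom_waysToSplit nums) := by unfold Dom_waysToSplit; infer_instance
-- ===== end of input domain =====

-- B rewrites A without mutating its argument (A overwrites `nums` with prefix sums in
-- place; the equivalence proved here is about the RETURN value only): one generic
-- recursive binary search used with two predicates replaces A's two imperative while
-- loops, the break becomes an explicit cut index, and the mod is taken once at the end.

-- ===== PORT A =====
-- `for i in range(1, len(nums)): nums[i] += nums[i-1]`  (indices are always in range)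
def pvA_prefix (nums : List Int) : List Int :=
  (PySem.List.pyRange 1 (nums.length : Int) 1).foldl
    (fun a i => a.set i.toNat (PySem.List.pyGetD a i 0 + PySem.List.pyGetD a (i - 1) 0)) nums

-- the `while start < end` loop of find_low (list indices are always in range;
-- fuel (e - s).toNat only bounds the iteration count — the interval shrinks each step,
-- so the fuel-0 branch is never reached and the loop computes exactly what Python does)
def pvA_lowLoop (a : List Int) (idx : Int) : Nat → Int → Int → Int
  | 0, s, _ => s
  | fuel + 1, s, e =>
    if s < e then
      if PySem.List.pyGetD a ((s + e) >>> (1:Nat)) 0 - 2 * PySem.List.pyGetD a idx 0 ≥ 0 then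
        pvA_lowLoop a idx fuel s ((s + e) >>> (1:Nat))
      else pvA_lowLoop a idx fuel ((s + e) >>> (1:Nat) + 1) e
    else s

def pvA_findLow (a : List Int) (idx : Int) : Int :=
  pvA_lowLoop a idx (((a.length : Int) - 1) - (idx + 1)).toNat (idx + 1) ((a.length : Int) - 1)

-- the `while start < end` loop of find_high (same fuel bound, same remark)
def pvA_highLoop (a : List Int) (idx : Int) : Nat → Int → Int → Int
  | 0, s, _ => s
  | fuel + 1, s, e =>
    if s < e then
      if PySem.List.pyGetD a (-1) 0 - PySem.List.pyGetD a ((s + e) >>> (1:Nat)) 0 ≥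
          PySem.List.pyGetD a ((s + e) >>> (1:Nat)) 0 - PySem.List.pyGetD a idx 0 then
        pvA_highLoop a idx fuel ((s + e) >>> (1:Nat) + 1) e
      else pvA_highLoop a idx fuel s ((s + e) >>> (1:Nat))
    else s

def pvA_findHigh (a : List Int) (idx : Int) : Int :=
  pvA_highLoop a idx (((a.length : Int) - 1) - (idx + 1)).toNat (idx + 1) ((a.length : Int) - 1)

-- `for left in range(len(nums)): if …: break; ans = (ans + max(0, …)) % MOD`
def pvA_main (a : List Int) (lefts : List Int) (ans : Int) : Int :=
  match lefts with
  | [] => ans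
  | l :: rest =>
    if PySem.List.pyGetD a (-1) 0 - PySem.List.pyGetD a l 0 < 2 * PySem.List.pyGetD a l 0 then ans
    else pvA_main a rest
      (PySem.Int.mod (ans + max 0 (pvA_findHigh a l - pvA_findLow a l)) 1000000007)

def waysToSplit (nums : List Int) : Int :=
  let a := pvA_prefix nums
  pvA_main a (PySem.List.pyRange 0 (a.length : Int) 1) 0

-- ===== PORT B =====
-- the prefix-sum scan of Source B (append loop with running sum s)
def pvB_scan (nums : List Int) (s : Int) : List Int :=
  match nums with
  | [] => []
  | v :: vs => (s + v) :: pvB_scan vs (s + v)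

-- Source B's generic recursive `bisect(pred, lo, hi)` (fuel (hi - lo).toNat is a pure
-- totality guard: the interval shrinks each step, the fuel-0 branch is never reached)
def pvB_bisect (pred : Int → Bool) : Nat → Int → Int → Int
  | 0, lo, _ => lo
  | fuel + 1, lo, hi =>
    if lo ≥ hi then lo
    else
      if pred ((lo + hi) >>> (1:Nat)) then pvB_bisect pred fuel lo ((lo + hi) >>> (1:Nat))
      else pvB_bisect pred fuel ((lo + hi) >>> (1:Nat) + 1) hi

-- `next((l for l in range(n) if total - p[l] < 2 * p[l]), n)`
def pvB_findCut (p : List Int) (total : Int) (ls : List Int) (n : Int) : Int :=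
  match ls with
  | [] => n
  | l :: rest =>
    if total - PySem.List.pyGetD p l 0 < 2 * PySem.List.pyGetD p l 0 then l
    else pvB_findCut p total rest n

def waysToSplit_alt (nums : List Int) : Int :=
  let p := pvB_scan nums 0
  let n : Int := (nums.length : Int)
  let total := if p = [] then 0 else PySem.List.pyGetD p (-1) 0
  let cut := pvB_findCut p total (PySem.List.pyRange 0 n 1) n
  PySem.Int.mod
    (((PySem.List.pyRange 0 cut 1).map (fun l =>
        max 0 (pvB_bisect (fun m => decide (2 * PySem.List.pyGetD p m 0 > total + PySem.List.pyGetD p l 0)) ((n - 1) - (l + 1)).toNat (l + 1) (n - 1)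
             - pvB_bisect (fun m => decide (PySem.List.pyGetD p m 0 ≥ 2 * PySem.List.pyGetD p l 0)) ((n - 1) - (l + 1)).toNat (l + 1) (n - 1)))).sum)
    1000000007

-- ===== PRECONDITION & SPEC =====
def Spec_waysToSplit (nums : List Int) (out : Int) : Prop := out = waysToSplit_alt nums
instance (nums : List Int) (out : Int) : Decidable (Spec_waysToSplit nums out) := by unfold Spec_waysToSplit; infer_instance

-- ===== CLAIM (what is proved, stated in full; the proofs are below) =====
def Claim_equal_waysToSplit : Prop := ∀ (nums : List Int), Dom_waysToSplit nums → Spec_waysToSplit nums (waysToSplit nums)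

-- ===== LEMMAS AND PROOFS =====

theorem pvB_scan_length (nums : List Int) (s : Int) : (pvB_scan nums s).length = nums.length := by
  induction nums generalizing s with
  | nil => rfl
  | cons v vs ih => simp [pvB_scan, ih]

theorem pvB_scan_snoc (xs : List Int) (v s : Int) :
    pvB_scan (xs ++ [v]) s = pvB_scan xs s ++ [(pvB_scan xs s).getLastD s + v] := by
  induction xs generalizing s with
  | nil => simp [pvB_scan]
  | cons x t ih =>
    simp only [List.cons_append, pvB_scan, ih (s + x), List.cons_inj_right]
    rw [List.getLastD_cons]

-- A's in-place prefix loop produces exactly B's scan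
theorem pvA_prefix_eq (nums : List Int) : pvA_prefix nums = pvB_scan nums 0 := by
  have key : ∀ k : Nat, k ≤ nums.length →
      (PySem.List.pyRange 1 (k : Int) 1).foldl
        (fun a i => a.set i.toNat (PySem.List.pyGetD a i 0 + PySem.List.pyGetD a (i - 1) 0)) nums
      = pvB_scan (nums.take k) 0 ++ nums.drop k := by
    intro k
    induction k with
    | zero =>
      intro _
      rw [PySem.List.pyRange_one_eq_nil (by norm_num)]
      simp [pvB_scan]
    | succ k ihk =>
      intro hk
      rcases Nat.eq_zero_or_pos k with hk0 | hk1
      · subst hk0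
        have h01 : ((0 + 1 : Nat) : Int) = 1 := by norm_num
        rw [h01, PySem.List.pyRange_one_eq_nil le_rfl]
        cases nums with
        | nil => simp at hk
        | cons x t => simp [pvB_scan]
      · have hkl : k < nums.length := by omega
        rw [show ((k+1 : Nat) : Int) = (k : Int) + 1 by push_cast; ring,
          PySem.List.pyRange_one_succ_right (by exact_mod_cast hk1), List.foldl_append,
          ihk (by omega)]
        simp only [List.foldl_cons, List.foldl_nil]
        set L := pvB_scan (nums.take k) 0 with hL
        have hLlen : L.length = k := by
          rw [hL, pvB_scan_length, List.length_take]; omega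
        have hLne : L ≠ [] := by
          intro h; rw [h] at hLlen; simp at hLlen; omega
        have hdrop : nums.drop k = nums[k] :: nums.drop (k+1) :=
          List.drop_eq_getElem_cons hkl
        -- the two reads
        have hget1 : PySem.List.pyGetD (L ++ nums.drop k) ((k : Int)) 0 = nums[k] := by
          rw [PySem.List.pyGetD_natCast, hdrop, List.getD_eq_getElem?_getD,
            List.getElem?_append_right (by omega), hLlen]
          simp [List.getElem?_eq_getElem hkl]
        have hget2 : PySem.List.pyGetD (L ++ nums.drop k) ((k : Int) - 1) 0 = L.getLastD 0 := by
          rw [show ((k : Int) - 1) = ((k-1 : Nat) : Int) by omega, PySem.List.pyGetD_natCast,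
            List.getD_eq_getElem?_getD, List.getElem?_append_left (by omega),
            List.getElem?_eq_getElem (by omega : k - 1 < L.length)]
          rw [List.getLastD_eq_getLast?, List.getLast?_eq_getElem?,
            List.getElem?_eq_getElem (by omega : L.length - 1 < L.length)]
          simp only [Option.getD_some]
          congr 1
          omega
        rw [hget1, hget2, Int.toNat_natCast,
          List.take_add_one, List.getElem?_eq_getElem hkl]
        rw [show (nums.take k ++ (some nums[k]).toList) = nums.take k ++ [nums[k]] from rfl,
          pvB_scan_snoc, ← hL, hdrop,
          List.set_append_right _ _ (by omega), hLlen]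
        simp only [Nat.sub_self, List.set_cons_zero]
        rw [List.append_assoc]
        simp only [List.cons_append, List.nil_append]
        rw [add_comm]
  rw [pvA_prefix, key nums.length le_rfl]
  simp

-- A's find_low loop is B's bisect with the low predicate
theorem pvA_lowLoop_eq (a : List Int) (idx : Int) (fuel : Nat) (s e : Int) :
    pvA_lowLoop a idx fuel s e =
      pvB_bisect (fun m => decide (PySem.List.pyGetD a m 0 ≥ 2 * PySem.List.pyGetD a idx 0)) fuel s e := by
  induction fuel generalizing s e with
  | zero => rfl
  | succ fuel ih =>
    rw [pvA_lowLoop, pvB_bisect]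
    by_cases h : s < e
    · rw [if_pos h, if_neg (show ¬ s ≥ e by omega)]
      by_cases hc : PySem.List.pyGetD a ((s + e) >>> (1:Nat)) 0 - 2 * PySem.List.pyGetD a idx 0 ≥ 0
      · rw [if_pos hc, if_pos (show (decide (PySem.List.pyGetD a ((s + e) >>> (1:Nat)) 0 ≥
          2 * PySem.List.pyGetD a idx 0) = true) by simp; omega)]
        exact ih _ _
      · rw [if_neg hc, if_neg (show ¬ (decide (PySem.List.pyGetD a ((s + e) >>> (1:Nat)) 0 ≥
          2 * PySem.List.pyGetD a idx 0) = true) by simp; omega)]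
        exact ih _ _
    · rw [if_neg h, if_pos (show s ≥ e by omega)]

-- A's find_high loop is B's bisect with the high predicate
theorem pvA_highLoop_eq (a : List Int) (idx : Int) (fuel : Nat) (s e : Int) :
    pvA_highLoop a idx fuel s e =
      pvB_bisect (fun m => decide (2 * PySem.List.pyGetD a m 0 >
        PySem.List.pyGetD a (-1) 0 + PySem.List.pyGetD a idx 0)) fuel s e := by
  induction fuel generalizing s e with
  | zero => rfl
  | succ fuel ih =>
    rw [pvA_highLoop, pvB_bisect]
    by_cases h : s < e
    · rw [if_pos h, if_neg (show ¬ s ≥ e by omega)]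
      by_cases hc : PySem.List.pyGetD a (-1) 0 - PySem.List.pyGetD a ((s + e) >>> (1:Nat)) 0 ≥
          PySem.List.pyGetD a ((s + e) >>> (1:Nat)) 0 - PySem.List.pyGetD a idx 0
      · rw [if_pos hc, if_neg (show ¬ (decide (2 * PySem.List.pyGetD a ((s + e) >>> (1:Nat)) 0 >
          PySem.List.pyGetD a (-1) 0 + PySem.List.pyGetD a idx 0) = true) by simp; omega)]
        exact ih _ _
      · rw [if_neg hc, if_pos (show (decide (2 * PySem.List.pyGetD a ((s + e) >>> (1:Nat)) 0 >
          PySem.List.pyGetD a (-1) 0 + PySem.List.pyGetD a idx 0) = true) by simp; omega)]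
        exact ih _ _
    · rw [if_neg h, if_pos (show s ≥ e by omega)]

theorem pvB_findCut_lb (p : List Int) (total : Int) (ls : List Int) (n c : Int)
    (hls : ∀ x ∈ ls, c ≤ x) (hn : c ≤ n) : c ≤ pvB_findCut p total ls n := by
  induction ls with
  | nil => exact hn
  | cons l rest ihr =>
    rw [pvB_findCut]
    split
    · exact hls l List.mem_cons_self
    · exact ihr fun x hx => hls x (List.mem_cons_of_mem _ hx)

-- the break-loop with stepwise mod equals "sum up to the cut, mod once"
theorem pvA_main_eq (p : List Int) (n : Int) (k : Int) (acc : Int)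
    (h0 : 0 ≤ acc) (h1 : acc < 1000000007) :
    pvA_main p (PySem.List.pyRange k n 1) acc =
      PySem.Int.mod (acc +
        (((PySem.List.pyRange k (pvB_findCut p (PySem.List.pyGetD p (-1) 0) (PySem.List.pyRange k n 1) n) 1).map (fun l =>
          max 0 (pvA_findHigh p l - pvA_findLow p l))).sum)) 1000000007 := by
  have M0 : (0:Int) < 1000000007 := by norm_num
  have H : ∀ (m : Nat) (k acc : Int), (n - k).toNat = m → 0 ≤ acc → acc < 1000000007 →
      pvA_main p (PySem.List.pyRange k n 1) acc =
        PySem.Int.mod (acc +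
          (((PySem.List.pyRange k (pvB_findCut p (PySem.List.pyGetD p (-1) 0) (PySem.List.pyRange k n 1) n) 1).map (fun l =>
            max 0 (pvA_findHigh p l - pvA_findLow p l))).sum)) 1000000007 := by
    intro m
    induction m using Nat.strong_induction_on with
    | _ m ih =>
      intro k acc hm h0 h1
      by_cases hk : k < n
      · rw [PySem.List.pyRange_one_cons hk]
        by_cases hc : PySem.List.pyGetD p (-1) 0 - PySem.List.pyGetD p k 0 < 2 * PySem.List.pyGetD p k 0
        · rw [pvA_main, if_pos hc, pvB_findCut, if_pos (by omega),
            PySem.List.pyRange_one_eq_nil (le_refl k)]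
          simp only [List.map_nil, List.sum_nil, add_zero]
          rw [PySem.Int.mod_eq_emod_of_pos M0]; omega
        · rw [pvA_main, if_neg hc, pvB_findCut, if_neg (by omega)]
          have hrec := ih (n - (k+1)).toNat (by omega) (k+1)
            (PySem.Int.mod (acc + max 0 (pvA_findHigh p k - pvA_findLow p k)) 1000000007)
            rfl (PySem.Int.mod_nonneg _ M0) (PySem.Int.mod_lt _ M0)
          rw [hrec]
          have hcut : k + 1 ≤ pvB_findCut p (PySem.List.pyGetD p (-1) 0) (PySem.List.pyRange (k+1) n 1) n := by
            exact pvB_findCut_lb p _ _ n (k+1)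
              (fun x hx => ((PySem.List.mem_pyRange_one).1 hx).1) (by omega)
          rw [PySem.List.pyRange_one_cons (by omega : k < pvB_findCut p (PySem.List.pyGetD p (-1) 0) (PySem.List.pyRange (k+1) n 1) n)]
          simp only [List.map_cons, List.sum_cons]
          rw [PySem.Int.mod_eq_emod_of_pos M0, PySem.Int.mod_eq_emod_of_pos M0,
            PySem.Int.mod_eq_emod_of_pos M0]
          omega
      · rw [PySem.List.pyRange_one_eq_nil (by omega : n ≤ k), pvA_main, pvB_findCut,
          PySem.List.pyRange_one_eq_nil (by omega : n ≤ k)]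
        simp only [List.map_nil, List.sum_nil, add_zero]
        rw [PySem.Int.mod_eq_emod_of_pos M0]; omega
  exact H (n - k).toNat k acc rfl h0 h1

-- ===== VERDICT (by name: the statement is the Claim_ definition above) =====
theorem waysToSplit_spec : Claim_equal_waysToSplit := by
  intro nums _
  unfold Spec_waysToSplit
  by_cases hnil : nums = []
  · subst hnil; decide
  · have hp : pvB_scan nums 0 ≠ [] := by
      intro h
      have hl := pvB_scan_length nums 0
      rw [h] at hl
      exact hnil (List.eq_nil_of_length_eq_zero hl.symm)
    have hlen : (pvB_scan nums 0).length = nums.length := pvB_scan_length nums 0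
    show waysToSplit nums = waysToSplit_alt nums
    rw [waysToSplit, waysToSplit_alt]
    simp only [pvA_prefix_eq, hlen, if_neg hp]
    rw [pvA_main_eq (pvB_scan nums 0) (nums.length : Int) 0 0 le_rfl (by norm_num), zero_add]
    have hfun : (fun l => max 0 (pvA_findHigh (pvB_scan nums 0) l - pvA_findLow (pvB_scan nums 0) l))
        = (fun l => max 0
            (pvB_bisect (fun m => decide (2 * PySem.List.pyGetD (pvB_scan nums 0) m 0 >
                PySem.List.pyGetD (pvB_scan nums 0) (-1) 0 + PySem.List.pyGetD (pvB_scan nums 0) l 0)) (((nums.length : Int) - 1) - (l + 1)).toNat (l + 1) ((nums.length : Int) - 1)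
           - pvB_bisect (fun m => decide (PySem.List.pyGetD (pvB_scan nums 0) m 0 ≥
                2 * PySem.List.pyGetD (pvB_scan nums 0) l 0)) (((nums.length : Int) - 1) - (l + 1)).toNat (l + 1) ((nums.length : Int) - 1))) := by
      funext l
      rw [pvA_findHigh, pvA_findLow, pvA_lowLoop_eq, pvA_highLoop_eq, hlen]
    rw [hfun]
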